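-- pv_equiv track=rewrite | github.com/ramin-karimian/topic-modeling | myScripts/words_associations.py | create_i2v
-- ===== SOURCE A (Python) =====
-- def create_i2v(data):
--     i2v = {}
--     veclist = []
--     for i in range(len(data)):
--         for j in range(len(data[i])):
--             if j not in i2v.keys(): i2v[j] = [data[i][j]]
--             else: i2v[j].append(data[i][j])
--             if len(i2v[j]) == len(data):
--                 veclist.append(i2v[j])
--     return i2v , veclist
-- ===== SOURCE B (Python) =====
-- def create_i2v(data):
--     i2v = {}
--     for row in data:
--         for j, v in enumerate(row):
--             i2v.setdefault(j, []).append(v)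
--     minlen = min((len(row) for row in data), default=0)
--     veclist = [i2v[j] for j in range(minlen)]
--     return i2v, veclist
-- ===== Notes on version B (the rewrite author's own statement) =====
-- stated objective: simpler
-- what changed: A interleaves full-column detection (len(i2v[j]) == len(data)) into the transpose loop; B first builds the transpose with setdefault/append over enumerate, then computes veclist in a separate pass as the columns 0..min(row lengths)-1, which are exactly the full ones.
import Mathlib
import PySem

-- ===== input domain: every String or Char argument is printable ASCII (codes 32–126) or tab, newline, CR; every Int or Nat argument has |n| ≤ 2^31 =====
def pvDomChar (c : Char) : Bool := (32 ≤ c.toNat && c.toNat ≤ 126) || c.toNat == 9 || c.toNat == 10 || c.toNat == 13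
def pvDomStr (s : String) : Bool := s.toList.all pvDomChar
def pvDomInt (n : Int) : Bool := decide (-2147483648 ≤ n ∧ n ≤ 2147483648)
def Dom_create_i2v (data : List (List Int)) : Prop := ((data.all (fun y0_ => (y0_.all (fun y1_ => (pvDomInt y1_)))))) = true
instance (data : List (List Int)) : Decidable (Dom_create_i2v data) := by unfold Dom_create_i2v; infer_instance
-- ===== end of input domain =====

-- B splits A's interleaved loop into two passes: build the transpose dict, then read off
-- columns 0..min(row lengths)-1 as the full columns (objective: simpler; return value only).


-- ===== PORT A =====
def create_i2v (data : List (List Int)) : (List (Int × List Int)) × List (List Int) :=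
  -- i2v = {} ; veclist = [] ; for i in range(len(data)): for j in range(len(data[i])): …
  let r :=
    (PySem.List.pyRange 0 (PySem.List.len data)).foldl (fun st i =>
      (PySem.List.pyRange 0 (PySem.List.len (PySem.List.pyGetD data i []))).foldl (fun st j =>
        let x := PySem.List.pyGetD (PySem.List.pyGetD data i []) j 0
        -- if j not in i2v.keys(): i2v[j] = [x]  else: i2v[j].append(x)
        let i2v' := if st.1.contains j = false then st.1.insert j [x]
                    else st.1.modify j [] (fun l => l ++ [x])
        -- if len(i2v[j]) == len(data): veclist.append(i2v[j])
        let vl' := if PySem.List.len (i2v'.getD j []) = PySem.List.len data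
                   then st.2 ++ [i2v'.getD j []] else st.2
        (i2v', vl')) st)
      ((PySem.Dict.empty : PySem.Dict Int (List Int)), ([] : List (List Int)))
  (r.1.items, r.2)

-- ===== PORT B =====
def create_i2v_alt (data : List (List Int)) : (List (Int × List Int)) × List (List Int) :=
  -- i2v.setdefault(j, []).append(v) extends the entry at j in place: exact as Dict.modify j [] (· ++ [v])
  let i2v := data.foldl (fun d row =>
      (PySem.List.enumerate row).foldl (fun d q => d.modify q.1 [] (fun l => l ++ [q.2])) d)
    (PySem.Dict.empty : PySem.Dict Int (List Int))
  -- minlen = min((len(row) for row in data), default=0)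
  let minlen := PySem.List.minD (data.map (fun r => PySem.List.len r)) (fun x => x) 0
  let veclist := (PySem.List.pyRange 0 minlen).map (fun j => i2v.getD j [])
  (i2v.items, veclist)

-- ===== PRECONDITION & SPEC =====
def Spec_create_i2v (data : List (List Int)) (out : (List (Int × List Int)) × List (List Int)) : Prop := out = create_i2v_alt data
instance (data : List (List Int)) (out : (List (Int × List Int)) × List (List Int)) : Decidable (Spec_create_i2v data out) := by unfold Spec_create_i2v; infer_instance

-- ===== CLAIM (what is proved, stated in full; the proofs are below) =====
def Claim_equal_create_i2v : Prop := ∀ (data : List (List Int)), Dom_create_i2v data → Spec_create_i2v data (create_i2v data)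

-- ===== LEMMAS AND PROOFS =====

-- the per-element dict update both ports perform, the per-row step, and the dict built from rows
def pvDStep (d : PySem.Dict Int (List Int)) (q : Int × Int) : PySem.Dict Int (List Int) :=
  d.modify q.1 [] (fun l => l ++ [q.2])

def pvRowStep (d : PySem.Dict Int (List Int)) (row : List Int) : PySem.Dict Int (List Int) :=
  (PySem.List.enumerate row).foldl pvDStep d

def pvDictOf (p : List (List Int)) : PySem.Dict Int (List Int) :=
  p.foldl pvRowStep PySem.Dict.empty

-- column j of the rows p (entries of rows long enough), in row order
def pvCol : List (List Int) → Int → List Int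
  | [], _ => []
  | r :: p, j => (if 0 ≤ j then r[j.toNat]?.toList else []) ++ pvCol p j

-- A's combined per-element step (dict update + conditional veclist append), N = len(data)
def pvAStep (N : Int) (st : PySem.Dict Int (List Int) × List (List Int)) (q : Int × Int) :
    PySem.Dict Int (List Int) × List (List Int) :=
  let d' := pvDStep st.1 q
  (d', if PySem.List.len (d'.getD q.1 []) = N then st.2 ++ [d'.getD q.1 []] else st.2)

-- what A appends to veclist while processing row r after rows p, and over a list of rows
def pvRowApp (p : List (List Int)) (r : List Int) (N : Int) : List (List Int) :=
  (PySem.List.enumerate r).filterMap (fun q =>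
    if (((pvCol p q.1 ++ [q.2]).length : Int) = N) then some (pvCol p q.1 ++ [q.2]) else none)

def pvAppAll (p : List (List Int)) : List (List Int) → Int → List (List Int)
  | [], _ => []
  | r :: rest, N => pvRowApp p r N ++ pvAppAll (p ++ [r]) rest N

theorem pv_step_eq (d : PySem.Dict Int (List Int)) (j x : Int) :
    (if d.contains j = false then d.insert j [x] else d.modify j [] (fun l => l ++ [x]))
      = pvDStep d (j, x) := by
  by_cases h : d.contains j = false
  · simp [h, pvDStep, PySem.Dict.modify, PySem.Dict.getD_of_not_contains d _ h]
  · simp [h, pvDStep]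

theorem pv_filter_enum (r : List Int) (s j : Int) :
    ((PySem.List.enumerate r s).filter (fun q => q.1 == j)).map (fun q => q.2)
      = if s ≤ j then r[(j - s).toNat]?.toList else [] := by
  induction r generalizing s with
  | nil => simp [PySem.List.enumerate]
  | cons x r ih =>
    rw [PySem.List.enumerate_cons]
    by_cases h : s = j
    · subst h
      have hrest : (PySem.List.enumerate r (s+1)).filter (fun q => q.1 == s) = [] := by
        rw [List.filter_eq_nil_iff]
        intro q hq
        rw [PySem.List.mem_enumerate_iff] at hq
        obtain ⟨k, hk, rfl⟩ := hq
        simp; omega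
      simp [hrest]
    · have h2 : (s ≤ j) ↔ (s + 1 ≤ j) := by omega
      rw [List.filter_cons]
      simp only [show ((s : Int) == j) = false by simp [h]]
      rw [if_neg (by simp)]
      rw [ih (s+1)]
      by_cases hle : s + 1 ≤ j
      · have : (j - s).toNat = (j - (s+1)).toNat + 1 := by omega
        simp [hle, h2.mpr hle, this]
      · simp [hle, h2.not.mpr hle]

theorem pv_getD_dictfold (p : List (List Int)) (d : PySem.Dict Int (List Int)) (j : Int) :
    (p.foldl pvRowStep d).getD j [] = d.getD j [] ++ pvCol p j := by
  induction p generalizing d with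
  | nil => simp [pvCol]
  | cons r p ih =>
    rw [List.foldl_cons, ih]
    have : (pvRowStep d r).getD j [] = d.getD j [] ++ (if 0 ≤ j then r[j.toNat]?.toList else []) := by
      unfold pvRowStep pvDStep
      rw [PySem.Dict.getD_foldl_modify_append]
      rw [pv_filter_enum r 0 j]
      simp
    rw [this, pvCol, List.append_assoc]

theorem pv_col_append (p q : List (List Int)) (j : Int) :
    pvCol (p ++ q) j = pvCol p j ++ pvCol q j := by
  induction p with
  | nil => simp [pvCol]
  | cons r p ih => simp [pvCol, ih]

theorem pv_col_len_le (p : List (List Int)) (j : Int) : (pvCol p j).length ≤ p.length := by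
  induction p with
  | nil => simp [pvCol]
  | cons r p ih =>
    have : (if 0 ≤ j then r[j.toNat]?.toList else []).length ≤ 1 := by
      split_ifs
      · cases h : r[j.toNat]? <;> simp
      · simp
    simp only [pvCol, List.length_append, List.length_cons]
    omega

theorem pv_col_len_eq_iff (p : List (List Int)) (j : Int) (hj : 0 ≤ j) :
    (pvCol p j).length = p.length ↔ ∀ r ∈ p, j.toNat < r.length := by
  induction p with
  | nil => simp [pvCol]
  | cons r p ih =>
    have hle := pv_col_len_le p j
    simp only [pvCol, List.length_append, List.length_cons, if_pos hj, List.mem_cons]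
    by_cases h : j.toNat < r.length
    · rw [List.getElem?_eq_getElem h]
      simp only [Option.toList_some, List.length_singleton]
      constructor
      · intro hl q hq
        rcases hq with rfl | hq
        · exact h
        · exact (ih.mp (by omega)) q hq
      · intro hall
        have := ih.mpr (fun q hq => hall q (Or.inr hq))
        omega
    · rw [List.getElem?_eq_none_iff.mpr (by omega)]
      simp only [Option.toList_none, List.length_nil]
      constructor
      · intro hl; omega
      · intro hall; exact absurd (hall r (Or.inl rfl)) h

theorem pv_row_vl (N : Int) (r : List Int) (G : Int → List Int) :
    ∀ (s : Int) (d : PySem.Dict Int (List Int)) (vl : List (List Int)),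
    (∀ j, s ≤ j → d.getD j [] = G j) →
    ((PySem.List.enumerate r s).foldl (pvAStep N) (d, vl)).2
      = vl ++ (PySem.List.enumerate r s).filterMap (fun q =>
          if (((G q.1 ++ [q.2]).length : Int) = N) then some (G q.1 ++ [q.2]) else none) := by
  induction r with
  | nil => intro s d vl _; simp [PySem.List.enumerate]
  | cons x r ih =>
    intro s d vl hd
    rw [PySem.List.enumerate_cons, List.foldl_cons, List.filterMap_cons]
    have hself : (pvDStep d (s, x)).getD s [] = G s ++ [x] := by
      unfold pvDStep
      rw [PySem.Dict.getD_modify_self, hd s le_rfl]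
    have hne : ∀ j, s + 1 ≤ j → (pvDStep d (s, x)).getD j [] = G j := by
      intro j hj
      unfold pvDStep
      rw [PySem.Dict.getD_modify_of_ne _ _ _ (by omega : j ≠ s), hd j (by omega)]
    have := ih (s+1) (pvDStep d (s,x))
        (if PySem.List.len ((pvDStep d (s,x)).getD s []) = N then vl ++ [(pvDStep d (s,x)).getD s []] else vl) hne
    simp only [pvAStep] at this ⊢
    rw [this, hself]
    simp only [PySem.List.len_eq]
    by_cases hc : ((G s).length : Int) + 1 = N
    · simp [hc]
    · simp [hc]

theorem pv_fold_fst (N : Int) (l : List (Int × Int)) :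
    ∀ (d : PySem.Dict Int (List Int)) (vl : List (List Int)),
    ((l.foldl (pvAStep N) (d, vl)).1) = l.foldl pvDStep d := by
  induction l with
  | nil => intro d vl; rfl
  | cons q l ih => intro d vl; rw [List.foldl_cons, List.foldl_cons]; exact ih _ _

theorem pv_outer_fst (N : Int) (rest : List (List Int)) :
    ∀ (d : PySem.Dict Int (List Int)) (vl : List (List Int)),
    ((rest.foldl (fun st row => (PySem.List.enumerate row).foldl (pvAStep N) st) (d, vl)).1)
      = rest.foldl pvRowStep d := by
  induction rest with
  | nil => intro d vl; rfl
  | cons r rest ih =>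
    intro d vl
    rw [List.foldl_cons, List.foldl_cons]
    rcases hst : (PySem.List.enumerate r).foldl (pvAStep N) (d, vl) with ⟨d2, vl2⟩
    have hd2 : d2 = (PySem.List.enumerate r).foldl pvDStep d := by
      rw [← pv_fold_fst N (PySem.List.enumerate r) d vl, hst]
    rw [hd2] at *
    exact ih _ _

theorem pv_outer (N : Int) (rest : List (List Int)) :
    ∀ (p : List (List Int)) (vl : List (List Int)),
    ((rest.foldl (fun st row => (PySem.List.enumerate row).foldl (pvAStep N) st) (pvDictOf p, vl)).2)
      = vl ++ pvAppAll p rest N := by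
  induction rest with
  | nil => intro p vl; simp [pvAppAll]
  | cons r rest ih =>
    intro p vl
    rw [List.foldl_cons]
    have hG : ∀ j, (0:Int) ≤ j → (pvDictOf p).getD j [] = pvCol p j := by
      intro j _
      unfold pvDictOf
      rw [pv_getD_dictfold]
      simp
    have hsnd := pv_row_vl N r (fun j => pvCol p j) 0 (pvDictOf p) vl hG
    have hfst := pv_fold_fst N (PySem.List.enumerate r) (pvDictOf p) vl
    have hdict : (PySem.List.enumerate r).foldl pvDStep (pvDictOf p) = pvDictOf (p ++ [r]) := by
      unfold pvDictOf pvRowStep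
      rw [List.foldl_append]
      rfl
    have hpair : (PySem.List.enumerate r).foldl (pvAStep N) (pvDictOf p, vl)
        = (pvDictOf (p ++ [r]), vl ++ pvRowApp p r N) := by
      rcases hst : (PySem.List.enumerate r).foldl (pvAStep N) (pvDictOf p, vl) with ⟨d2, vl2⟩
      rw [hst] at hfst hsnd
      simp only at hfst hsnd
      rw [hfst] at *
      rw [hsnd, hdict]
      rfl
    rw [hpair, ih (p ++ [r]) (vl ++ pvRowApp p r N)]
    simp [pvAppAll]

theorem pv_rowApp_nil (p : List (List Int)) (r : List Int) (N : Int)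
    (h : (p.length : Int) + 1 < N) : pvRowApp p r N = [] := by
  unfold pvRowApp
  rw [List.filterMap_eq_nil_iff]
  intro q hq
  have := pv_col_len_le p q.1
  rw [if_neg]
  intro hN
  simp only [List.length_append, List.length_singleton] at hN
  omega

theorem pv_appAll_short (N : Int) (rest : List (List Int)) :
    ∀ (p : List (List Int)), ((p.length : Int) + (rest.length : Int) < N) → pvAppAll p rest N = [] := by
  induction rest with
  | nil => intro p _; rfl
  | cons r rest ih =>
    intro p h
    simp only [List.length_cons] at h
    rw [pvAppAll, pv_rowApp_nil p r N (by push_cast at h ⊢; omega), ih (p ++ [r]) (by simp; push_cast at h ⊢; omega)]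
    rfl

theorem pv_inner_eq (N : Int) (row : List Int) (st : PySem.Dict Int (List Int) × List (List Int)) :
    (PySem.List.pyRange 0 (PySem.List.len row)).foldl (fun st j =>
        let x := PySem.List.pyGetD row j 0
        let i2v' := if st.1.contains j = false then st.1.insert j [x]
                    else st.1.modify j [] (fun l => l ++ [x])
        let vl' := if PySem.List.len (i2v'.getD j []) = N
                   then st.2 ++ [i2v'.getD j []] else st.2
        (i2v', vl')) st
      = (PySem.List.enumerate row).foldl (pvAStep N) st := by
  rw [PySem.List.enumerate_eq_map_pyRange row 0, List.foldl_map]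
  apply PySem.List.foldl_congr_mem
  intro acc j _
  simp only [pvAStep, pv_step_eq]

theorem pv_A_eq (data : List (List Int)) :
    create_i2v data
      = ((pvDictOf data).items, pvAppAll [] data (data.length : Int)) := by
  unfold create_i2v
  simp only [pv_inner_eq (PySem.List.len data)]
  rw [PySem.List.foldl_pyRange_zero_pyGetD data []
    (fun st row => (PySem.List.enumerate row).foldl (pvAStep (PySem.List.len data)) st)]
  simp only [PySem.List.len_eq]
  rw [pv_outer_fst]
  have h2 := pv_outer ((data.length : Int)) data [] []
  simp only [pvDictOf, List.foldl_nil, List.nil_append] at h2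
  rw [h2]; rfl

theorem pv_filterMap_some {α β : Type} (l : List α) (f : α → Option β) (g : α → β)
    (h : ∀ x ∈ l, f x = some (g x)) : l.filterMap f = l.map g := by
  induction l with
  | nil => rfl
  | cons x l ih =>
    rw [List.filterMap_cons, h x (List.mem_cons_self), List.map_cons,
      ih (fun y hy => h y (List.mem_cons_of_mem _ hy))]

theorem pv_appAll_append (l1 l2 p : List (List Int)) (N : Int) :
    pvAppAll p (l1 ++ l2) N = pvAppAll p l1 N ++ pvAppAll (p ++ l1) l2 N := by
  induction l1 generalizing p with
  | nil => simp [pvAppAll]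
  | cons r l1 ih => simp [pvAppAll, ih (p ++ [r]), List.append_assoc]

theorem pv_last_row (p0 : List (List Int)) (last : List Int) :
    pvRowApp p0 last ((p0.length : Int) + 1)
      = (PySem.List.pyRange 0 (PySem.List.minD ((p0 ++ [last]).map (fun r => PySem.List.len r)) (fun x => x) 0)).map
          (fun j => pvCol (p0 ++ [last]) j) := by
  simp only [PySem.List.len_eq]
  obtain ⟨m, hm⟩ : ∃ m, PySem.List.min? ((p0 ++ [last]).map (fun r => ((r.length : Int)))) (fun x => x) = some m := by
    cases h : PySem.List.min? ((p0 ++ [last]).map (fun r => ((r.length : Int)))) (fun x => x) with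
    | none => exact absurd ((PySem.List.min?_eq_none_iff _ _).mp h) (by simp)
    | some m => exact ⟨m, rfl⟩
  have hmD : PySem.List.minD ((p0 ++ [last]).map (fun r => ((r.length : Int)))) (fun x => x) 0 = m := by
    unfold PySem.List.minD
    rw [hm]
    rfl
  have hmem := PySem.List.min?_mem hm
  have hmin : ∀ y ∈ (p0 ++ [last]).map (fun r => ((r.length : Int))), m ≤ y := by
    intro y hy; exact PySem.List.min?_isMin hm y hy
  simp only [List.mem_map] at hmem
  obtain ⟨r0, hr0, hr0len⟩ := hmem
  have h0m : 0 ≤ m := by rw [← hr0len]; positivity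
  have hmlast : m ≤ (last.length : Int) := hmin _ (List.mem_map_of_mem (by simp))
  have hminrow : ∀ r ∈ p0, m ≤ (r.length : Int) := by
    intro r hr
    exact hmin _ (List.mem_map_of_mem (by simp [hr]))
  rw [hmD]
  unfold pvRowApp
  rw [PySem.List.enumerate_eq_map_pyRange last 0, List.filterMap_map]
  simp only [PySem.List.len_eq]
  rw [PySem.List.pyRange_one_append 0 m ((last.length : Int)) h0m hmlast,
    List.filterMap_append]
  have h2 : (PySem.List.pyRange m ((last.length : Int))).filterMap
      ((fun q => if (((pvCol p0 q.1 ++ [q.2]).length : Int) = (p0.length : Int) + 1) then some (pvCol p0 q.1 ++ [q.2]) else none)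
        ∘ (fun j => (j, PySem.List.pyGetD last j 0))) = [] := by
    rw [List.filterMap_eq_nil_iff]
    intro j hj
    rw [PySem.List.mem_pyRange_one] at hj
    simp only [Function.comp_apply]
    rw [if_neg]
    intro hc
    simp only [List.length_append, List.length_singleton] at hc
    have hlen : (pvCol p0 j).length = p0.length := by omega
    have hall := (pv_col_len_eq_iff p0 j (by omega)).mp hlen
    rcases (List.mem_append.mp hr0) with hin | hin
    · have := hall r0 hin
      omega
    · simp only [List.mem_singleton] at hin
      subst hin
      omega
  rw [h2, List.append_nil]
  apply pv_filterMap_some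
  intro j hj
  rw [PySem.List.mem_pyRange_one] at hj
  simp only [Function.comp_apply]
  have hjlast : j < (last.length : Int) := by omega
  have hlen : (pvCol p0 j).length = p0.length :=
    (pv_col_len_eq_iff p0 j (by omega)).mpr (fun r hr => by have := hminrow r hr; omega)
  rw [if_pos (by simp only [List.length_append, List.length_singleton]; omega)]
  congr 1
  rw [pv_col_append]
  simp only [pvCol]
  rw [if_pos (by omega), List.getElem?_eq_getElem (by omega), List.append_nil]
  rw [PySem.List.pyGetD_eq_getElem last 0 (by omega) hjlast]
  simp

-- ===== VERDICT (by name: the statement is the Claim_ definition above) =====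
theorem create_i2v_spec : Claim_equal_create_i2v := by
  intro data _
  unfold Spec_create_i2v
  rw [pv_A_eq]
  show ((pvDictOf data).items, pvAppAll [] data (data.length : Int))
      = ((pvDictOf data).items,
         (PySem.List.pyRange 0 (PySem.List.minD (data.map (fun r => PySem.List.len r)) (fun x => x) 0)).map
           (fun j => (pvDictOf data).getD j []))
  have hgd : ∀ j : Int, (pvDictOf data).getD j [] = pvCol data j := by
    intro j
    unfold pvDictOf
    rw [pv_getD_dictfold]
    simp
  simp only [hgd]
  rcases List.eq_nil_or_concat data with rfl | ⟨p0, last, rfl⟩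
  · rfl
  · have hN : (((p0 ++ [last]).length : Int)) = (p0.length : Int) + 1 := by
      simp
    rw [Prod.mk.injEq]
    refine ⟨rfl, ?_⟩
    simp only [List.concat_eq_append]
    rw [hN, pv_appAll_append p0 [last] []]
    rw [pv_appAll_short _ p0 [] (by simp)]
    simp only [List.nil_append, pvAppAll, List.append_nil]
    rw [pv_last_row]
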